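-- pv_equiv track=rewrite | github.com/Hafiz-Sakib/CPP-for-CP | CP/L1/C-22(More Policy Based Data Structures)/a.py | solve
-- ===== SOURCE A (Python) =====
-- def solve(n, arr):
--     for i in range(n+1):
--         numLiars = i
--         truthTlrs = n - i
--         liarsCount = 0
--
--         for j in range(n):
--             if arr[j] <= numLiars:
--                 liarsCount += 1
--
--         if liarsCount > truthTlrs:
--             continue
--         if liarsCount + numLiars >= n:
--             return numLiars
--
--     return -1
-- ===== SOURCE B (Python) =====
-- def solve(n, arr):
--     s = sorted(arr[:n])
--     m = len(s)
--     p = 0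
--     for i in range(n + 1):
--         while p < m and s[p] <= i:
--             p += 1
--         if p <= n - i and p + i >= n:
--             return i
--     return -1
-- ===== Notes on version B (the rewrite author's own statement) =====
-- stated objective: faster
-- what changed: Instead of recounting arr[j] <= i over the whole array for every candidate i, B sorts arr[:n] once and sweeps a single pointer that incrementally maintains the count of elements <= i as i grows.
import Mathlib
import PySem

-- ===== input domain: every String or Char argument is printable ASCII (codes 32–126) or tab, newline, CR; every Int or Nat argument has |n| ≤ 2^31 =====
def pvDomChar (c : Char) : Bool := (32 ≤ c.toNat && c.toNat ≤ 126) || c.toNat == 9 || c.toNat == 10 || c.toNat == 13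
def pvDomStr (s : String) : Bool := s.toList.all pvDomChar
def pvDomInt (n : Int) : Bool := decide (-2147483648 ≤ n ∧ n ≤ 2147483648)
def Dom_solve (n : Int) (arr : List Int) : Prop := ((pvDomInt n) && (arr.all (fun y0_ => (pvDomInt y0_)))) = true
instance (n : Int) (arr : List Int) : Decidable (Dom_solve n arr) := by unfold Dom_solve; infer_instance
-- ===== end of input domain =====

-- B sorts arr[:n] once and sweeps one pointer to maintain the count of elements <= i, replacing A's per-i rescan (measured faster, asymptotic change).


-- ===== PORT A =====
-- the inner 'for j in range(n)' counting loop of A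
def innerCount (n : Int) (arr : List Int) (numLiars : Int) : Int :=
  (PySem.List.pyRange 0 n 1).foldl
    (fun c j => if PySem.List.pyGetD arr j 0 ≤ numLiars then c + 1 else c) 0

-- the outer 'for i in range(n+1)' loop with its early return
def solveLoop (n : Int) (arr : List Int) : List Int → Int
  | [] => -1
  | i :: rest =>
    let liarsCount := innerCount n arr i
    if liarsCount > n - i then solveLoop n arr rest
    else if liarsCount + i ≥ n then i
    else solveLoop n arr rest

def solve (n : Int) (arr : List Int) : Int :=
  solveLoop n arr (PySem.List.pyRange 0 (n + 1) 1)

-- ===== PORT B =====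
-- the 'while p < m and s[p] <= i: p += 1' loop of B
def advanceFuel (s : List Int) (i : Int) : Nat → Nat → Nat
  | p, 0 => p
  | p, f + 1 =>
    if h : p < s.length then
      if s[p] ≤ i then advanceFuel s i (p + 1) f else p
    else p

def advance (s : List Int) (i : Int) (p : Nat) : Nat := advanceFuel s i p (s.length - p)

-- the 'for i in range(n+1)' loop of B (fuel = number of remaining values of i)
def bLoop (s : List Int) (n : Int) : Nat → Int → Nat → Int
  | 0, _, _ => -1
  | k + 1, i, p =>
    let p' := advance s i p
    if (p' : Int) ≤ n - i ∧ (p' : Int) + i ≥ n then i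
    else bLoop s n k (i + 1) p'

def solve_alt (n : Int) (arr : List Int) : Int :=
  let s := PySem.List.sorted (PySem.List.slice arr none (some n)) (fun x => x) false
  bLoop s n (n + 1).toNat 0 0

-- ===== PRECONDITION & SPEC =====
-- Pre_ excludes exactly the inputs where A raises IndexError (arr[j] with n > len(arr)).
def Pre_solve (n : Int) (arr : List Int) : Prop := n ≤ (arr.length : Int)
instance (n : Int) (arr : List Int) : Decidable (Pre_solve n arr) := by unfold Pre_solve; infer_instance
def pvWitness_solve : Int × List Int := (3, [1, 2, 5])

def Spec_solve (n : Int) (arr : List Int) (out : Int) : Prop := out = solve_alt n arr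
instance (n : Int) (arr : List Int) (out : Int) : Decidable (Spec_solve n arr out) := by unfold Spec_solve; infer_instance

-- ===== CLAIM (what is proved, stated in full; the proofs are below) =====
def Claim_equal_solve : Prop := ∀ (n : Int) (arr : List Int), Dom_solve n arr → Pre_solve n arr → Spec_solve n arr (solve n arr)

-- ===== LEMMAS AND PROOFS =====

lemma advanceFuel_eq (s : List Int) (i : Int) :
    ∀ (f p : Nat), s.length - p ≤ f →
      advanceFuel s i p f = p + ((s.drop p).takeWhile (fun x => decide (x ≤ i))).length := by
  intro f
  induction f with
  | zero =>
    intro p hp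
    rw [List.drop_eq_nil_of_le (by omega)]
    simp [advanceFuel]
  | succ f ih =>
    intro p hp
    by_cases h : p < s.length
    · rw [List.drop_eq_getElem_cons h]
      by_cases hle : s[p] ≤ i
      · simp only [advanceFuel, dif_pos h, if_pos hle, List.takeWhile_cons, decide_eq_true hle]
        rw [ih (p+1) (by omega)]
        simp; omega
      · simp [advanceFuel, h, hle]
    · rw [List.drop_eq_nil_of_le (by omega)]
      simp [advanceFuel, h]

lemma takeWhile_length_eq_countP (i : Int) (l : List Int) (hl : l.Pairwise (· ≤ ·)) :
    (l.takeWhile (fun x => decide (x ≤ i))).length = l.countP (fun x => decide (x ≤ i)) := by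
  induction l with
  | nil => simp
  | cons a l ih =>
    rw [List.pairwise_cons] at hl
    by_cases h : a ≤ i
    · simp [List.countP_cons, h, ih hl.2]
    · have hz : (a :: l).countP (fun x => decide (x ≤ i)) = 0 := by
        rw [List.countP_eq_zero]
        intro x hx
        simp only [decide_eq_true_eq]
        rcases List.mem_cons.1 hx with rfl | hx
        · omega
        · have := hl.1 x hx; omega
      rw [hz, List.takeWhile_cons, decide_eq_false h]
      simp

lemma advance_eq_countP (s : List Int) (i : Int) (p : Nat)
    (hs : s.Pairwise (· ≤ ·)) (hp : ∀ x ∈ s.take p, x ≤ i) (hple : p ≤ s.length) :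
    advance s i p = s.countP (fun x => decide (x ≤ i)) := by
  unfold advance
  rw [advanceFuel_eq s i _ p le_rfl,
      takeWhile_length_eq_countP i _ (hs.drop),
      show s.countP (fun x => decide (x ≤ i))
         = (s.take p ++ s.drop p).countP (fun x => decide (x ≤ i)) by rw [List.take_append_drop],
      List.countP_append]
  have : (s.take p).countP (fun x => decide (x ≤ i)) = p := by
    rw [List.countP_eq_length.2 (by intro a ha; exact decide_eq_true (hp a ha))]
    simp [List.length_take, Nat.min_eq_left hple]
  omega

lemma take_countP_le (s : List Int) (i : Int) (hs : s.Pairwise (· ≤ ·)) :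
    ∀ x ∈ s.take (s.countP (fun x => decide (x ≤ i))), x ≤ i := by
  intro x hx
  rw [← takeWhile_length_eq_countP i s hs,
      ← List.prefix_iff_eq_take.mp (List.takeWhile_prefix _)] at hx
  exact of_decide_eq_true (List.mem_takeWhile_imp (p := fun x => decide (x ≤ i)) hx)

lemma innerCount_eq (n : Int) (arr : List Int) (i : Int)
    (h0 : 0 ≤ n) (hlen : n ≤ (arr.length : Int)) :
    innerCount n arr i = ((arr.take n.toNat).countP (fun x => decide (x ≤ i)) : Int) := by
  unfold innerCount
  rw [PySem.List.foldl_ite_add_one (fun j => PySem.List.pyGetD arr j 0 ≤ i)]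
  have hlt : ((arr.take n.toNat).length : Int) = n := by
    simp [List.length_take]; omega
  have hcg : (PySem.List.pyRange 0 n 1).countP (fun j => decide (PySem.List.pyGetD arr j 0 ≤ i))
      = (PySem.List.pyRange 0 n 1).countP (fun j => decide (PySem.List.pyGetD (arr.take n.toNat) j 0 ≤ i)) := by
    apply List.countP_congr
    intro j hj
    rw [PySem.List.mem_pyRange_one] at hj
    have e : PySem.List.pyGetD (arr.take n.toNat) j 0 = PySem.List.pyGetD arr j 0 := by
      rw [PySem.List.pyGetD_eq_getElem _ 0 hj.1 (by rw [hlt]; omega),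
          PySem.List.pyGetD_eq_getElem _ 0 hj.1 (by omega)]
      rw [List.getElem_take]
    rw [e]
  rw [hcg]
  have := @List.countP_map Int Int (fun x => decide (x ≤ i))
      (fun j => PySem.List.pyGetD (arr.take n.toNat) j 0) (PySem.List.pyRange 0 n 1)
  rw [show (PySem.List.pyRange 0 n 1) = PySem.List.pyRange 0 ((arr.take n.toNat).length : Int) 1 by rw [hlt]] at this ⊢
  simp only [Function.comp_def] at this
  rw [← this, PySem.List.map_pyGetD_pyRange_zero']
  simp

lemma loop_eq (n : Int) (arr s : List Int) (hlen : n ≤ (arr.length : Int))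
    (hs : s = PySem.List.sorted (PySem.List.slice arr none (some n)) (fun x => x) false) :
    ∀ (k : Nat) (i : Int) (p : Nat), 0 ≤ i → i + k = n + 1 →
      (∀ x ∈ s.take p, x ≤ i) → p ≤ s.length →
      solveLoop n arr (PySem.List.pyRange i (n + 1) 1) = bLoop s n k i p := by
  intro k
  induction k with
  | zero =>
    intro i p _ hik _ _
    rw [PySem.List.pyRange_one_eq_nil (by omega)]
    simp [solveLoop, bLoop]
  | succ k ih =>
    intro i p hi hik hinv hple
    have hin : i ≤ n := by omega
    have h0n : 0 ≤ n := by omega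
    have hsp : s.Pairwise (· ≤ ·) := by
      subst hs
      simpa using PySem.List.sorted_pairwise (PySem.List.slice arr none (some n)) (fun x => x)
    have hperm : s.Perm (arr.take n.toNat) := by
      rw [hs, PySem.List.slice_to arr h0n]
      exact PySem.List.sorted_perm _ _ _
    have hic : innerCount n arr i = (s.countP (fun x => decide (x ≤ i)) : Int) := by
      rw [innerCount_eq n arr i h0n hlen, hperm.countP_eq]
    have hadv : advance s i p = s.countP (fun x => decide (x ≤ i)) :=
      advance_eq_countP s i p hsp hinv hple
    rw [PySem.List.pyRange_one_cons (by omega)]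
    simp only [solveLoop, bLoop, hic, hadv]
    set c := s.countP (fun x => decide (x ≤ i)) with hc
    have hrec : solveLoop n arr (PySem.List.pyRange (i + 1) (n + 1) 1) = bLoop s n k (i + 1) c := by
      apply ih (i + 1) c (by omega) (by omega)
      · intro x hx
        have := take_countP_le s i hsp x (by rw [← hc] at *; exact hx)
        omega
      · exact List.countP_le_length
    by_cases h1 : (c : Int) > n - i
    · rw [if_pos h1, if_neg (by omega), hrec]
    · by_cases h2 : (c : Int) + i ≥ n
      · rw [if_neg h1, if_pos h2, if_pos ⟨by omega, h2⟩]
      · rw [if_neg h1, if_neg h2, if_neg (by omega), hrec]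

-- ===== VERDICT (by name: the statement is the Claim_ definition above) =====
theorem solve_spec : Claim_equal_solve := by
  intro n arr _ hpre
  unfold Spec_solve solve solve_alt
  by_cases hn : 0 ≤ n
  · exact (loop_eq n arr _ hpre rfl (n + 1).toNat 0 0 le_rfl (by omega) (by simp) (Nat.zero_le _))
  · rw [PySem.List.pyRange_one_eq_nil (by omega), show (n + 1).toNat = 0 by omega]
    rfl
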